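-- pv_equiv track=rewrite | github.com/filip-kobus/School-projects | python/porownywarka.py | wypisz_bledy
-- ===== SOURCE A (Python) =====
-- podkresl = chr(8254)  #pobieram znak górnego myślnika, który będzie służył za podkreślenie
--
-- def wypisz_bledy(lista, l1, l2):
--   bledy = ""
--   if l1 < l2 or l1 > l2:    #kiedy wyrazy mają różne długości cały wyraz zostaje podkreślony
--     for i in range(l2):
--       bledy += podkresl
--     return bledy + " "
--
--   for i in range(l1):
--     if i in lista:
--       bledy += podkresl
--       continue
--     bledy += " "
--   return bledy + " "
-- ===== SOURCE B (Python) =====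
-- podkresl = chr(8254)
--
-- def wypisz_bledy(lista, l1, l2):
--     if l1 != l2:
--         return podkresl * l2 + " "
--     chars = [" "] * l1
--     for j in lista:
--         if 0 <= j < l1:
--             chars[j] = podkresl
--     return "".join(chars) + " "
-- ===== Notes on version B (the rewrite author's own statement) =====
-- stated objective: alternative
-- what changed: Instead of scanning every position 0..l1-1 and testing membership in lista, B allocates a space buffer once and scatters the underline character only at the listed in-range positions, then joins; the unequal-length branch becomes string repetition instead of a concatenation loop.
import Mathlib
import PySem

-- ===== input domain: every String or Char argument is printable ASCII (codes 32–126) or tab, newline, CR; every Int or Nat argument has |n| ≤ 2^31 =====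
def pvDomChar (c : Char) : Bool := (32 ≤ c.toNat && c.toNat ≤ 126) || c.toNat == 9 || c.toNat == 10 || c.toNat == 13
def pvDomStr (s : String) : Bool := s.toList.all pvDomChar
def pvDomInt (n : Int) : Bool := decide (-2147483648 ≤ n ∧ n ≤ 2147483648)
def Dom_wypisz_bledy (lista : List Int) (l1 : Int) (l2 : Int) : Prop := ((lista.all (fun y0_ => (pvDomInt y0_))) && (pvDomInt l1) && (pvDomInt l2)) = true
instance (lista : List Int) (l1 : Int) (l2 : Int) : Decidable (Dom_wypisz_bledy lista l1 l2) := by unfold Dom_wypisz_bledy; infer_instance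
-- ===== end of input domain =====

-- B replaces A's scan-all-positions-and-test-membership loop by a one-pass scatter
-- into a preallocated space buffer (objective: alternative decomposition).

-- podkresl = chr(8254)
def pvU : Char := Char.ofNat 8254

-- ===== PORT A =====
def wypisz_bledy (lista : List Int) (l1 : Int) (l2 : Int) : String :=
  if l1 < l2 ∨ l1 > l2 then
    String.mk (((PySem.List.pyRange 0 l2 1).foldl (fun bledy _ => bledy ++ [pvU]) []) ++ [' '])
  else
    String.mk (((PySem.List.pyRange 0 l1 1).foldl
      (fun bledy i => if lista.contains i then bledy ++ [pvU] else bledy ++ [' ']) []) ++ [' '])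

-- ===== PORT B =====
-- loop body of B: chars[j] = podkresl, guarded by 0 <= j < l1
def pvScatter (l1 : Int) (cs : List Char) (j : Int) : List Char :=
  if 0 ≤ j ∧ j < l1 then cs.set j.toNat pvU else cs

def wypisz_bledy_alt (lista : List Int) (l1 : Int) (l2 : Int) : String :=
  if l1 ≠ l2 then
    String.mk (List.replicate l2.toNat pvU ++ [' '])
  else
    String.mk ((lista.foldl (pvScatter l1) (List.replicate l1.toNat ' ')) ++ [' '])

-- ===== PRECONDITION & SPEC =====
def Spec_wypisz_bledy (lista : List Int) (l1 : Int) (l2 : Int) (out : String) : Prop := out = wypisz_bledy_alt lista l1 l2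
instance (lista : List Int) (l1 : Int) (l2 : Int) (out : String) : Decidable (Spec_wypisz_bledy lista l1 l2 out) := by unfold Spec_wypisz_bledy; infer_instance

-- ===== CLAIM (what is proved, stated in full; the proofs are below) =====
def Claim_equal_wypisz_bledy : Prop := ∀ (lista : List Int) (l1 : Int) (l2 : Int), Dom_wypisz_bledy lista l1 l2 → Spec_wypisz_bledy lista l1 l2 (wypisz_bledy lista l1 l2)

-- ===== LEMMAS AND PROOFS =====

-- A's append-one-char loops unfold to init ++ map / init ++ replicate
theorem foldl_append_const (c : Char) : ∀ (r : List Int) (init : List Char),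
    r.foldl (fun b _ => b ++ [c]) init = init ++ List.replicate r.length c := by
  intro r
  induction r with
  | nil => simp
  | cons j rest ih =>
      intro init
      rw [List.foldl_cons, ih]
      simp [List.replicate_succ]

theorem foldl_ite_append (p : Int → Bool) (c1 c2 : Char) : ∀ (r : List Int) (init : List Char),
    r.foldl (fun b i => if p i then b ++ [c1] else b ++ [c2]) init
      = init ++ r.map (fun i => if p i then c1 else c2) := by
  intro r
  induction r with
  | nil => simp
  | cons j rest ih =>
      intro init
      by_cases hp : p j <;> simp [List.foldl_cons, ih, hp]

theorem scatter_length (l1 : Int) : ∀ (lista : List Int) (cs : List Char),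
    (lista.foldl (pvScatter l1) cs).length = cs.length := by
  intro lista
  induction lista with
  | nil => intro cs; rfl
  | cons j rest ih =>
      intro cs
      simp only [List.foldl_cons, ih]
      unfold pvScatter
      split <;> simp

theorem scatter_getElem (l1 : Int) : ∀ (lista : List Int) (cs : List Char)
    (k : Nat) (hk : k < cs.length) (hc : (cs.length : Int) = l1),
    (lista.foldl (pvScatter l1) cs)[k]'(by rw [scatter_length]; exact hk) =
      if lista.contains ((k : Nat) : Int) then pvU else cs[k] := by
  intro lista
  induction lista with
  | nil => intro cs k hk hc; simp
  | cons j rest ih =>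
      intro cs k hk hc
      have hguardk : (0 : Int) ≤ (k : Int) ∧ (k : Int) < l1 := by
        refine ⟨Int.natCast_nonneg k, ?_⟩
        rw [← hc]; exact_mod_cast hk
      simp only [List.foldl_cons]
      by_cases hg : (0 : Int) ≤ j ∧ j < l1
      · have hlen' : ((pvScatter l1 cs j).length : Int) = l1 := by
          simp only [pvScatter, hg, if_pos]; simpa using hc
        have hk' : k < (pvScatter l1 cs j).length := by
          simp only [pvScatter, hg, if_pos]; simpa using hk
        rw [ih (pvScatter l1 cs j) k hk' hlen']
        by_cases hjk : j = (k : Int)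
        · have hkn : j.toNat = k := by omega
          have hv : (pvScatter l1 cs j)[k]'hk' = pvU := by
            simp [pvScatter, hg, hkn]
          rw [hv]
          simp [hjk]
        · have hne : j.toNat ≠ k := by omega
          have hkj : ((k : Nat) : Int) ≠ j := Ne.symm hjk
          have hv : (pvScatter l1 cs j)[k]'hk' = cs[k] := by
            simp [pvScatter, hg, List.getElem_set, hne]
          rw [hv]
          simp [hkj]
      · have hset : pvScatter l1 cs j = cs := by simp [pvScatter, hg]
        have hjk : j ≠ (k : Int) := fun h => hg (h ▸ hguardk)
        have hkj : ((k : Nat) : Int) ≠ j := Ne.symm hjk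
        simp only [hset]
        rw [ih cs k hk hc]
        simp [hkj]

theorem equal_branch (lista : List Int) (l1 : Int) :
    (PySem.List.pyRange 0 l1 1).foldl
      (fun bledy i => if lista.contains i then bledy ++ [pvU] else bledy ++ [' ']) [] =
    lista.foldl (pvScatter l1) (List.replicate l1.toNat ' ') := by
  have hA : (PySem.List.pyRange 0 l1 1).foldl
      (fun bledy i => if lista.contains i then bledy ++ [pvU] else bledy ++ [' ']) [] =
      (PySem.List.pyRange 0 l1 1).map (fun i => if lista.contains i then pvU else ' ') := by
    simpa only [List.nil_append] using
      foldl_ite_append (fun i => lista.contains i) pvU ' ' (PySem.List.pyRange 0 l1 1) []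
  rw [hA]
  apply List.ext_getElem
  · simp [PySem.List.length_pyRange_one, scatter_length]
  · intro k hk1 hk2
    have hk : k < l1.toNat := by
      simpa [PySem.List.length_pyRange_one] using hk1
    have hkr : k < (List.replicate l1.toNat ' ').length := by simpa using hk
    have hrep : ((List.replicate l1.toNat ' ').length : Int) = l1 := by
      have h0 : 0 ≤ l1 := by
        by_contra h
        simp only [not_le] at h
        have : l1.toNat = 0 := by omega
        omega
      simp [Int.toNat_of_nonneg h0]
    rw [scatter_getElem l1 lista _ k hkr hrep]
    rw [List.getElem_map]
    rw [PySem.List.getElem_pyRange_one]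
    simp

-- ===== VERDICT (by name: the statement is the Claim_ definition above) =====
theorem wypisz_bledy_spec : Claim_equal_wypisz_bledy := by
  unfold Claim_equal_wypisz_bledy
  intro lista l1 l2 _
  unfold Spec_wypisz_bledy wypisz_bledy wypisz_bledy_alt
  by_cases h : l1 = l2
  · subst h
    simp only [lt_irrefl, gt_iff_lt, or_self, if_neg, ne_eq, not_true_eq_false, ite_false]
    rw [equal_branch]
  · have hlt : l1 < l2 ∨ l1 > l2 := by omega
    rw [if_pos hlt, if_pos h]
    rw [foldl_append_const pvU (PySem.List.pyRange 0 l2 1) []]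
    simp [PySem.List.length_pyRange_one]
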